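-- pv_equiv track=rewrite | github.com/naumovda/python | matrices_src.py | MinCDiagSum
-- ===== SOURCE A (Python) =====
-- def MinCDiagSum(a, n):
--     '''
--     Return minimal of sums of absolute values of elements
--     in diagonals parallel to counter-diagonal
--     Parameters:
--         a: array
--             Input square matrix
--         n: int
--             Size of each axis
--     '''
--     sums = []
--     for k in range(n-1):
--         s = 0
--         for i in range(k+1):
--             j = abs(i - k)
--             if (i == n-1) and (j == 0):
--                 break
--             s += abs(a[i][j])
--         sums.append(s)
--     for k in range(1, n):
--         s = 0
--         for i in range(k, n):
--             j = n - 1 + k - i  # weird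
--             s += abs(a[i][j])
--         sums.append(s)
--     s = min(sums)
--     return s
-- ===== SOURCE B (Python) =====
-- def MinCDiagSum(a, n):
--     # Bucket every element into its anti-diagonal in one row-major pass,
--     # then take the min over all anti-diagonals except the main one.
--     diag = [0] * (2 * n - 1)
--     for i in range(n):
--         for j in range(n):
--             diag[i + j] += abs(a[i][j])
--     return min(diag[d] for d in range(2 * n - 1) if d != n - 1)
-- ===== Notes on version B (the rewrite author's own statement) =====
-- stated objective: alternative
-- what changed: B replaces A's per-diagonal walks (two k-loops, each re-walking one anti-diagonal, plus a dead break) with a single row-major double scan that buckets abs(a[i][j]) into a diag[i+j] accumulator array of length 2n-1, then takes the min over all buckets except the main anti-diagonal.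
-- outside the precondition, e.g. on MinCDiagSum([[1], [3, 4]], 2): A returns 1, B raises IndexError
import Mathlib
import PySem

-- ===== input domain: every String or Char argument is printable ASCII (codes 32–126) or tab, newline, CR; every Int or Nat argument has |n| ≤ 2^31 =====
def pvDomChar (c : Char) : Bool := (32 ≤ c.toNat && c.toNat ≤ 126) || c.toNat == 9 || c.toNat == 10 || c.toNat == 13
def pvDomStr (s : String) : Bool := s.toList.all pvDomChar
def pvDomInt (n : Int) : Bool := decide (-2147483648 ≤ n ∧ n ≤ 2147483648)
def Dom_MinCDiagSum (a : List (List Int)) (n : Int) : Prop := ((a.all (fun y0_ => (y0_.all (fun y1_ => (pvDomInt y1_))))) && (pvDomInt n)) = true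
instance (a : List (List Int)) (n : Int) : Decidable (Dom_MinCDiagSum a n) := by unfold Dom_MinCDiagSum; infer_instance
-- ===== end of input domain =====

-- B buckets every |a[i][j]| into an anti-diagonal accumulator array in one row-major pass
-- instead of walking each diagonal separately (objective: alternative traversal/data structure).


-- abs(a[i][j]) (the defaults are only reachable outside Pre_)
def pvAbsAt (a : List (List Int)) (i j : Int) : Int :=
  |PySem.List.pyGetD (PySem.List.pyGetD a i []) j 0|

-- ===== PORT A =====
-- inner loop of A's first 'for k' (the break is ported as a sticky flag)
def pvInnerA1 (a : List (List Int)) (n k : Int) : Int × Bool :=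
  (PySem.List.pyRange 0 (k+1) 1).foldl (fun st i =>
    if st.2 then st
    else
      let j := |i - k|
      if i = n - 1 ∧ j = 0 then (st.1, true)
      else (st.1 + pvAbsAt a i j, st.2)) (0, false)

-- inner loop of A's second 'for k'
def pvInnerA2 (a : List (List Int)) (n k : Int) : Int :=
  (PySem.List.pyRange k n 1).foldl (fun s i =>
    let j := n - 1 + k - i
    s + pvAbsAt a i j) 0

def MinCDiagSum (a : List (List Int)) (n : Int) : Int :=
  let sums : List Int :=
    (PySem.List.pyRange 0 (n-1) 1).foldl (fun sums k => sums ++ [(pvInnerA1 a n k).1]) []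
  let sums :=
    (PySem.List.pyRange 1 n 1).foldl (fun sums k => sums ++ [pvInnerA2 a n k]) sums
  (PySem.List.min? sums (fun x => x)).getD 0

-- ===== PORT B =====
-- diag[i+j] += abs(a[i][j])
def pvRowUpd (a : List (List Int)) (i : Int) (dg : List Int) (j : Int) : List Int :=
  PySem.List.pySetD dg (i+j) (PySem.List.pyGetD dg (i+j) 0 + pvAbsAt a i j)

-- the row-major bucketing double loop over diag = [0]*(2*n-1)
def pvBucket (a : List (List Int)) (n : Int) : List Int :=
  (PySem.List.pyRange 0 n 1).foldl (fun dg i =>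
    (PySem.List.pyRange 0 n 1).foldl (pvRowUpd a i) dg)
    (List.replicate (2*n-1).toNat 0)

def MinCDiagSum_alt (a : List (List Int)) (n : Int) : Int :=
  let diag := pvBucket a n
  let cands := ((PySem.List.pyRange 0 (2*n-1) 1).filter (fun d => d != n-1)).map
      (fun d => PySem.List.pyGetD diag d 0)
  (PySem.List.min? cands (fun x => x)).getD 0

-- ===== PRECONDITION & SPEC =====
-- Pre_ is the natural domain of the docstring: an n×n matrix with n ≥ 2 (the row list and the
-- rows may be longer).  It is slightly narrower than where A returns: A never reads the
-- counter-diagonal entries (nor row 0's last entry), so it also returns on some ragged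
-- matrices missing exactly those entries, where B's full row-major scan raises; those
-- degenerate shapes are excluded.
def Pre_MinCDiagSum (a : List (List Int)) (n : Int) : Prop :=
  2 ≤ n ∧ n ≤ (a.length : Int) ∧ ∀ r ∈ a.take n.toNat, n ≤ (r.length : Int)
instance (a : List (List Int)) (n : Int) : Decidable (Pre_MinCDiagSum a n) := by
  unfold Pre_MinCDiagSum; infer_instance

def pvWitness_MinCDiagSum : List (List Int) × Int := ([[1, 2], [3, 4]], 2)

def Spec_MinCDiagSum (a : List (List Int)) (n : Int) (out : Int) : Prop := out = MinCDiagSum_alt a n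
instance (a : List (List Int)) (n : Int) (out : Int) : Decidable (Spec_MinCDiagSum a n out) := by unfold Spec_MinCDiagSum; infer_instance

-- ===== CLAIM (what is proved, stated in full; the proofs are below) =====
def Claim_equal_MinCDiagSum : Prop := ∀ (a : List (List Int)) (n : Int), Dom_MinCDiagSum a n → Pre_MinCDiagSum a n → Spec_MinCDiagSum a n (MinCDiagSum a n)

-- ===== LEMMAS AND PROOFS =====

-- the sum of |a[i][d-i]| over the d-th anti-diagonal, as an ite-sum over all rows
def pvSD (a : List (List Int)) (n d : Int) : Int :=
  ((PySem.List.pyRange 0 n 1).map (fun i =>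
    if i ≤ d ∧ d < i + n then pvAbsAt a i (d - i) else 0)).sum

-- B's inner loop: row i adds its element to each bucket i ≤ d < i+m it touches
theorem pvRow_spec (a : List (List Int)) (i : Int) (hi : 0 ≤ i) :
    ∀ (m : ℕ) (dg : List Int), i.toNat + m ≤ dg.length →
      ((PySem.List.pyRange 0 (m:Int) 1).foldl (pvRowUpd a i) dg).length = dg.length ∧
      ∀ d : ℕ, PySem.List.pyGetD ((PySem.List.pyRange 0 (m:Int) 1).foldl (pvRowUpd a i) dg) (d:Int) 0
        = PySem.List.pyGetD dg (d:Int) 0 +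
          (if i ≤ (d:Int) ∧ (d:Int) < i + m then pvAbsAt a i ((d:Int) - i) else 0) := by
  intro m
  induction m with
  | zero =>
    intro dg hlen
    rw [show ((0:ℕ):Int) = 0 by simp, PySem.List.pyRange_one_eq_nil le_rfl]
    refine ⟨rfl, fun d => ?_⟩
    simp
  | succ m ih =>
    intro dg hlen
    have hsplit : PySem.List.pyRange 0 ((m+1:ℕ):Int) 1
        = PySem.List.pyRange 0 (m:Int) 1 ++ [(m:Int)] := by
      rw [show ((m+1:ℕ):Int) = (m:Int) + 1 by push_cast; ring]
      exact PySem.List.pyRange_one_succ_right (by positivity)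
    obtain ⟨ihlen, ihget⟩ := ih dg (by omega)
    rw [hsplit, List.foldl_append]
    set res := (PySem.List.pyRange 0 (m:Int) 1).foldl (pvRowUpd a i) dg with hres
    have hidx : i + (m:Int) = ((i.toNat + m : ℕ) : Int) := by push_cast; omega
    have hidxlt : i.toNat + m < res.length := by omega
    constructor
    · simp only [List.foldl_cons, List.foldl_nil, pvRowUpd, PySem.List.length_pySetD, ihlen]
    · intro d
      simp only [List.foldl_cons, List.foldl_nil, pvRowUpd, hidx]
      rw [PySem.List.pyGetD_pySetD_natCast res (i.toNat + m) d _ _ hidxlt]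
      by_cases hd : d = i.toNat + m
      · subst hd
        have h1 : ¬ (i ≤ ((i.toNat + m:ℕ):Int) ∧ ((i.toNat + m:ℕ):Int) < i + m) := by push_cast; omega
        have h2 : (i ≤ ((i.toNat + m:ℕ):Int) ∧ ((i.toNat + m:ℕ):Int) < i + (m+1:ℕ)) := by push_cast; omega
        have harg : ((i.toNat + m:ℕ):Int) - i = (m:Int) := by omega
        rw [if_pos rfl, ihget, if_neg h1, if_pos h2, harg]
        ring
      · rw [if_neg hd, ihget]
        have hcond : (i ≤ (d:Int) ∧ (d:Int) < i + (m+1:ℕ)) ↔ (i ≤ (d:Int) ∧ (d:Int) < i + m) := by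
          push_cast; omega
        by_cases hc : i ≤ (d:Int) ∧ (d:Int) < i + (m:Int)
        · rw [if_pos hc, if_pos (by push_cast at hcond ⊢; omega)]
        · rw [if_neg hc, if_neg (by push_cast at hcond ⊢; omega)]

-- B's outer loop: after the first m rows every bucket holds its partial diagonal sum
theorem pvBucket_partial (a : List (List Int)) (n : Int) (hn : 1 ≤ n) :
    ∀ (m : ℕ), (m:Int) ≤ n →
      (((PySem.List.pyRange 0 (m:Int) 1).foldl (fun dg i =>
          (PySem.List.pyRange 0 n 1).foldl (pvRowUpd a i) dg)
          (List.replicate (2*n-1).toNat 0)).length = (2*n-1).toNat) ∧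
      ∀ d : ℕ, PySem.List.pyGetD ((PySem.List.pyRange 0 (m:Int) 1).foldl (fun dg i =>
          (PySem.List.pyRange 0 n 1).foldl (pvRowUpd a i) dg)
          (List.replicate (2*n-1).toNat 0)) (d:Int) 0
        = ((PySem.List.pyRange 0 (m:Int) 1).map (fun i =>
            if i ≤ (d:Int) ∧ (d:Int) < i + n then pvAbsAt a i ((d:Int) - i) else 0)).sum := by
  intro m
  induction m with
  | zero =>
    intro _
    rw [show ((0:ℕ):Int) = 0 by simp, PySem.List.pyRange_one_eq_nil le_rfl]
    exact ⟨by simp, fun d => by simp⟩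
  | succ m ih =>
    intro hm
    have hm' : (m:Int) ≤ n := by push_cast at hm ⊢; omega
    obtain ⟨ihlen, ihget⟩ := ih hm'
    have hsplit : PySem.List.pyRange 0 ((m+1:ℕ):Int) 1
        = PySem.List.pyRange 0 (m:Int) 1 ++ [(m:Int)] := by
      rw [show ((m+1:ℕ):Int) = (m:Int) + 1 by push_cast; ring]
      exact PySem.List.pyRange_one_succ_right (by positivity)
    rw [hsplit, List.foldl_append]
    set res := (PySem.List.pyRange 0 (m:Int) 1).foldl (fun dg i =>
          (PySem.List.pyRange 0 n 1).foldl (pvRowUpd a i) dg)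
          (List.replicate (2*n-1).toNat 0) with hres
    simp only [List.foldl_cons, List.foldl_nil]
    have hnn : n = ((n.toNat : ℕ) : Int) := by omega
    have hrow := pvRow_spec a (m:Int) (by positivity) n.toNat res
      (by simp only [Int.toNat_natCast]; omega)
    rw [← hnn] at hrow
    obtain ⟨rlen, rget⟩ := hrow
    constructor
    · rw [rlen, ihlen]
    · intro d
      rw [rget d, ihget d, List.map_append, List.sum_append]
      simp only [List.map_cons, List.map_nil, List.sum_cons, List.sum_nil]
      ring

theorem pvBucket_spec (a : List (List Int)) (n : Int) (hn : 1 ≤ n) (d : ℕ) :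
    PySem.List.pyGetD (pvBucket a n) (d:Int) 0 = pvSD a n (d:Int) := by
  have h := pvBucket_partial a n hn n.toNat (by omega)
  rw [show ((n.toNat:ℕ):Int) = n by omega] at h
  unfold pvBucket pvSD
  exact h.2 d

-- A's break in the first inner loop never fires when no visited i equals n-1
theorem pvNoBreak (a : List (List Int)) (n k : Int) :
    ∀ (l : List Int), (∀ i ∈ l, ¬(i = n - 1 ∧ |i - k| = 0)) → ∀ s : Int,
      l.foldl (fun st i =>
        if st.2 then st
        else
          let j := |i - k|
          if i = n - 1 ∧ j = 0 then (st.1, true)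
          else (st.1 + pvAbsAt a i j, st.2)) (s, false)
      = (l.foldl (fun s i => s + pvAbsAt a i |i - k|) s, false) := by
  intro l
  induction l with
  | nil => intro _ s; rfl
  | cons x t ih =>
    intro h s
    simp only [List.foldl_cons, Bool.false_eq_true, if_false]
    rw [if_neg (h x List.mem_cons_self)]
    exact ih (fun i hi => h i (List.mem_cons_of_mem _ hi)) _

theorem pvInnerA1_spec (a : List (List Int)) (n k : Int) (hk : 0 ≤ k) (hkn : k < n - 1) :
    (pvInnerA1 a n k).1 = pvSD a n k := by
  unfold pvInnerA1
  rw [pvNoBreak a n k _ (by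
    intro i hi
    rw [PySem.List.mem_pyRange_one] at hi
    rintro ⟨h1, _⟩; omega)]
  rw [PySem.List.foldl_add]
  unfold pvSD
  rw [show PySem.List.pyRange 0 n 1
      = PySem.List.pyRange 0 (k+1) 1 ++ PySem.List.pyRange (k+1) n 1 from
    PySem.List.pyRange_one_append 0 (k+1) n (by omega) (by omega)]
  rw [List.map_append, List.sum_append]
  have h2 : (((PySem.List.pyRange (k+1) n 1).map (fun i =>
      if i ≤ k ∧ k < i + n then pvAbsAt a i (k - i) else 0)).sum) = 0 := by
    apply List.sum_eq_zero
    intro x hx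
    simp only [List.mem_map] at hx
    obtain ⟨i, hi, rfl⟩ := hx
    rw [PySem.List.mem_pyRange_one] at hi
    rw [if_neg (by omega)]
  rw [h2, add_zero]
  dsimp only
  rw [zero_add]
  congr 1
  apply List.map_congr_left
  intro i hi
  rw [PySem.List.mem_pyRange_one] at hi
  rw [if_pos (by omega), show |i - k| = k - i by rw [abs_of_nonpos (by omega)]; ring]

theorem pvInnerA2_spec (a : List (List Int)) (n k : Int) (hk : 1 ≤ k) (hkn : k < n) :
    pvInnerA2 a n k = pvSD a n (n - 1 + k) := by
  unfold pvInnerA2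
  simp only []
  rw [PySem.List.foldl_add]
  unfold pvSD
  rw [show PySem.List.pyRange 0 n 1
      = PySem.List.pyRange 0 k 1 ++ PySem.List.pyRange k n 1 from
    PySem.List.pyRange_one_append 0 k n (by omega) (by omega)]
  rw [List.map_append, List.sum_append]
  have h1 : (((PySem.List.pyRange 0 k 1).map (fun i =>
      if i ≤ n - 1 + k ∧ n - 1 + k < i + n then pvAbsAt a i (n - 1 + k - i) else 0)).sum) = 0 := by
    apply List.sum_eq_zero
    intro x hx
    simp only [List.mem_map] at hx
    obtain ⟨i, hi, rfl⟩ := hx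
    rw [PySem.List.mem_pyRange_one] at hi
    rw [if_neg (by omega)]
  rw [h1, zero_add]
  rw [zero_add]
  congr 1
  apply List.map_congr_left
  intro i hi
  rw [PySem.List.mem_pyRange_one] at hi
  rw [if_pos (by omega)]

-- range(2n-1) with n-1 filtered out is range(n-1) followed by range(n, 2n-1)
theorem pvFilter_split (n : Int) (hn : 2 ≤ n) :
    (PySem.List.pyRange 0 (2*n-1) 1).filter (fun d => d != n-1)
      = PySem.List.pyRange 0 (n-1) 1 ++ PySem.List.pyRange n (2*n-1) 1 := by
  rw [show PySem.List.pyRange 0 (2*n-1) 1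
      = PySem.List.pyRange 0 (n-1) 1 ++ (PySem.List.pyRange (n-1) n 1 ++ PySem.List.pyRange n (2*n-1) 1) by
    rw [← PySem.List.pyRange_one_append (n-1) n (2*n-1) (by omega) (by omega)]
    exact PySem.List.pyRange_one_append 0 (n-1) (2*n-1) (by omega) (by omega)]
  rw [List.filter_append, List.filter_append]
  rw [show PySem.List.pyRange (n-1) n 1 = [n-1] by
    have h := PySem.List.pyRange_one_singleton (n-1)
    rw [show n-1+1 = n by ring] at h
    exact h]
  congr 1
  · apply List.filter_eq_self.mpr
    intro x hx
    rw [PySem.List.mem_pyRange_one] at hx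
    simp; omega
  · rw [show List.filter (fun d => d != n-1) [n-1] = [] by simp]
    rw [List.nil_append]
    apply List.filter_eq_self.mpr
    intro x hx
    rw [PySem.List.mem_pyRange_one] at hx
    simp; omega

theorem pvMain (a : List (List Int)) (n : Int) (hn : 2 ≤ n) :
    MinCDiagSum a n = MinCDiagSum_alt a n := by
  simp only [MinCDiagSum, MinCDiagSum_alt]
  rw [PySem.List.foldl_append_singleton_eq_map, PySem.List.foldl_append_singleton_eq_map,
    List.nil_append, pvFilter_split n hn, List.map_append]
  have hA1 : (PySem.List.pyRange 0 (n-1) 1).map (fun k => (pvInnerA1 a n k).1)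
      = (PySem.List.pyRange 0 (n-1) 1).map (fun d => PySem.List.pyGetD (pvBucket a n) d 0) := by
    apply List.map_congr_left
    intro k hk
    rw [PySem.List.mem_pyRange_one] at hk
    rw [pvInnerA1_spec a n k (by omega) (by omega)]
    rw [show k = ((k.toNat : ℕ) : Int) by omega, pvBucket_spec a n (by omega)]
  have hA2 : (PySem.List.pyRange 1 n 1).map (fun k => pvInnerA2 a n k)
      = (PySem.List.pyRange n (2*n-1) 1).map (fun d => PySem.List.pyGetD (pvBucket a n) d 0) := by
    rw [PySem.List.pyRange_one 1 n, PySem.List.pyRange_one n (2*n-1), List.map_map, List.map_map,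
      show 2*n-1-n = n-1 by ring]
    apply List.map_congr_left
    intro t ht
    rw [List.mem_range] at ht
    simp only [Function.comp_apply]
    rw [pvInnerA2_spec a n (1 + (t:Int)) (by omega) (by omega)]
    rw [show n - 1 + (1 + (t:Int)) = n + t by ring]
    rw [show n + (t:Int) = ((((n + (t:Int)).toNat : ℕ)) : Int) by omega,
      pvBucket_spec a n (by omega)]
  rw [hA1, hA2]

-- ===== VERDICT (by name: the statement is the Claim_ definition above) =====
theorem MinCDiagSum_spec : Claim_equal_MinCDiagSum := by
  intro a n _ hpre
  unfold Spec_MinCDiagSum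
  exact pvMain a n hpre.1
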